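-- pv_equiv track=rewrite | github.com/pla2n/python_practice | python/best20/6.sandwich.py | solution
-- ===== SOURCE A (Python) =====
-- def solution(data):
--     sand = '12341'
--     count = 0
--     s= ''.join(map(str, data))
--     while s.find(sand) !=  -1:
--         s = s.replace(sand, '', 1)
--         count += 1
--     return count
-- ===== SOURCE B (Python) =====
-- def solution(data):
--     # One left-to-right pass with a stack: push each character, and whenever
--     # the top of the stack spells '12341', pop those five and count one removal.
--     pat = list('12341')
--     s = ''.join(map(str, data))
--     stack = []
--     count = 0
--     for c in s:
--         stack.append(c)
--         if stack[-5:] == pat: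
--             del stack[-5:]
--             count += 1
--     return count
-- ===== Notes on version B (the rewrite author's own statement) =====
-- stated objective: alternative
-- what changed: Replaced the repeated full-string find-and-replace loop with a single left-to-right stack pass that pops and counts whenever its top five characters spell '12341'.
import Mathlib
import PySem

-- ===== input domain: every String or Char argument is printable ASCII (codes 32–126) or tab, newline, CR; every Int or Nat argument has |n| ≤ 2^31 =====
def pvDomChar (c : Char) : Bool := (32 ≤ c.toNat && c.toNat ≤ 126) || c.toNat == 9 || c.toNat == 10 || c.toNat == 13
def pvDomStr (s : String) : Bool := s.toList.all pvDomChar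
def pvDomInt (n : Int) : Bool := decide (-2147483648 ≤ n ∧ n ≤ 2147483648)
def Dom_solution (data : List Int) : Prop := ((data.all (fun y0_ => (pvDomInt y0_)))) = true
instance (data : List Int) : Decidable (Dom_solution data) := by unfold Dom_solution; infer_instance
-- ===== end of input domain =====

-- B replaces A's repeated full-string find-and-replace loop by a single left-to-right
-- stack pass that pops when its top spells '12341' (objective: alternative).

-- ===== PORT A =====
-- sand = '12341'
def pvSand : List Char := ['1', '2', '3', '4', '1']

-- s.replace(sand, '', 1): remove the FIRST occurrence of sand (ported by hand;
-- exact for count=1 with empty replacement: left part ++ part after the occurrence).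
def pvReplace1 (s : List Char) : List Char :=
  let i := PySem.Chars.find s pvSand
  if i = -1 then s else s.take i.toNat ++ s.drop (i.toNat + 5)

-- termination fact used by the while-loop port below
theorem pvReplace1_length_lt (s : List Char) (h : ¬ PySem.Chars.find s pvSand = -1) :
    (pvReplace1 s).length < s.length := by
  have h0 : 0 ≤ PySem.Chars.find s pvSand := by
    have := PySem.Chars.neg_one_le_find s pvSand; omega
  obtain ⟨hpre, -⟩ := PySem.Chars.find_spec h0
  have hlen := hpre.length_le
  simp only [List.length_drop] at hlen
  have h5 : pvSand.length = 5 := rfl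
  rw [h5] at hlen
  simp only [pvReplace1, h, if_false, List.length_append, List.length_take, List.length_drop]
  omega

-- while s.find(sand) != -1: s = s.replace(sand, '', 1); count += 1
def pvLoopA (count : Int) (s : List Char) : Int :=
  if h : ¬ PySem.Chars.find s pvSand = -1 then pvLoopA (count + 1) (pvReplace1 s)
  else count
termination_by s.length
decreasing_by exact pvReplace1_length_lt s h

def solution (data : List Int) : Int :=
  pvLoopA 0 (PySem.Chars.join [] (data.map PySem.Int.toChars))

-- ===== PORT B =====
-- the stack is kept REVERSED (top = head), so stack.append(c) is c :: st and
-- 'stack[-5:] == list("12341")' is 'st.take 5 = reverse "12341"'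
def pvStep (acc : List Char × Int) (c : Char) : List Char × Int :=
  let st := c :: acc.1
  if st.take 5 = ['1', '4', '3', '2', '1'] then (st.drop 5, acc.2 + 1) else (st, acc.2)

def solution_alt (data : List Int) : Int :=
  ((PySem.Chars.join [] (data.map PySem.Int.toChars)).foldl pvStep ([], 0)).2

-- ===== PRECONDITION & SPEC =====
def Spec_solution (data : List Int) (out : Int) : Prop := out = solution_alt data
instance (data : List Int) (out : Int) : Decidable (Spec_solution data out) := by unfold Spec_solution; infer_instance

-- ===== CLAIM (what is proved, stated in full; the proofs are below) =====
def Claim_equal_solution : Prop := ∀ (data : List Int), Dom_solution data → Spec_solution data (solution data)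

-- ===== LEMMAS AND PROOFS =====

-- the count component of B's fold is a pure accumulator
theorem pvStep_shift (u : List Char) (st : List Char) (n : Int) :
    u.foldl pvStep (st, n) = ((u.foldl pvStep (st, 0)).1, n + (u.foldl pvStep (st, 0)).2) := by
  induction u generalizing st n with
  | nil => simp
  | cons c u ih =>
    simp only [List.foldl_cons, pvStep]
    split_ifs with hc
    · rw [ih _ (0 + 1), ih _ (n + 1)]; ring_nf
    · exact ih _ _

-- if the popping test fires then '12341' is a suffix of the text read so far
theorem pvPop_suffix (c : Char) (st : List Char)
    (h : (c :: st).take 5 = ['1', '4', '3', '2', '1']) :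
    pvSand <:+ st.reverse ++ [c] := by
  rw [show (5 : Nat) = 4 + 1 from rfl, List.take_succ_cons] at h
  injection h with hc hst
  refine ⟨(st.drop 4).reverse, ?_⟩
  conv_rhs => rw [show st = st.take 4 ++ st.drop 4 from (List.take_append_drop 4 st).symm]
  simp [hst, hc, pvSand]

-- a '12341'-free text is pushed without any pop
theorem pvNopop (u : List Char) (st : List Char) (n : Int)
    (h : ¬ pvSand <:+: st.reverse ++ u) :
    u.foldl pvStep (st, n) = (u.reverse ++ st, n) := by
  induction u generalizing st n with
  | nil => simp
  | cons c u ih =>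
    have hnc : ¬ (c :: st).take 5 = ['1', '4', '3', '2', '1'] := by
      intro hc
      exact h (((pvPop_suffix c st hc).isInfix).trans
        ⟨[], u, by simp⟩)
    simp only [List.foldl_cons, pvStep, hnc, if_false]
    rw [ih (c :: st) n (by simpa using h)]
    simp

-- no occurrence at all ⇒ B counts nothing
theorem pvCount_nf (s : List Char) (h : PySem.Chars.find s pvSand = -1) :
    (s.foldl pvStep ([], 0)).2 = 0 := by
  have hninf : ¬ pvSand <:+: s := (PySem.Chars.find_eq_neg_one_iff s pvSand).mp h
  rw [pvNopop s [] 0 (by simpa using hninf)]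

-- removing the FIRST occurrence lowers B's count by exactly one
theorem pvCount_removeFirst (s : List Char) (h : ¬ PySem.Chars.find s pvSand = -1) :
    (s.foldl pvStep ([], 0)).2 = ((pvReplace1 s).foldl pvStep ([], 0)).2 + 1 := by
  have h0 : 0 ≤ PySem.Chars.find s pvSand := by
    have := PySem.Chars.neg_one_le_find s pvSand; omega
  obtain ⟨hpre, hmin⟩ := PySem.Chars.find_spec h0
  set i : Nat := (PySem.Chars.find s pvSand).toNat with hi
  obtain ⟨w, hw⟩ := hpre
  have hs : s = s.take i ++ (['1', '2', '3', '4'] ++ ('1' :: w)) := by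
    conv_lhs => rw [← List.take_append_drop i s]
    rw [← hw]; rfl
  set u : List Char := s.take i with hu
  have hwdrop : s.drop (i + 5) = w := by
    have hh := congrArg (List.drop 5) hw.symm
    rw [List.drop_drop] at hh
    simpa [Nat.add_comm, pvSand] using hh
  have hilen : i ≤ s.length := by
    by_contra hlt
    push Not at hlt
    have : s.drop i = [] := List.drop_eq_nil_of_le (le_of_lt hlt)
    rw [this] at hw; simp [pvSand] at hw
  have hulen : u.length = i := by simp [hu, hilen]
  -- the first occurrence is first: u ++ '1234' is '12341'-free
  have hufree : ¬ pvSand <:+: (u ++ ['1', '2', '3', '4']) := by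
    intro hinf
    obtain ⟨j, hj⟩ := (PySem.Chars.exists_prefix_drop_iff_isIn pvSand _).mpr
      ((PySem.Chars.isIn_iff_infix pvSand _).mpr hinf)
    have hjlen : pvSand.length ≤ ((u ++ ['1', '2', '3', '4']).drop j).length := hj.length_le
    simp [pvSand, hulen] at hjlen
    have hji : j < i := by omega
    apply hmin j hji
    have : s.drop j = (u ++ ['1', '2', '3', '4']).drop j ++ ('1' :: w) := by
      conv_lhs => rw [hs]
      rw [← List.append_assoc, List.drop_append_of_le_length (by simp [hulen]; omega)]
    rw [this]
    exact hj.trans (List.prefix_append _ _)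
  have hufree' : ¬ pvSand <:+: u :=
    fun hx => hufree (hx.trans (List.prefix_append u _).isInfix)
  -- B's fold over s: push u++'1234' untouched, pop at the final '1', continue with w
  have hrunA : s.foldl pvStep ([], 0) = w.foldl pvStep (u.reverse, 1) := by
    conv_lhs => rw [hs, ← List.append_assoc, List.foldl_append]
    rw [pvNopop (u ++ ['1', '2', '3', '4']) [] 0 (by simpa using hufree)]
    simp only [List.foldl_cons, pvStep, List.append_nil, List.reverse_append]
    norm_num
  -- B's fold over s with the occurrence removed: push u untouched, continue with w
  have hrep : pvReplace1 s = u ++ w := by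
    simp only [pvReplace1, h, if_false]
    rw [← hi, ← hu, hwdrop]
  have hrunB : (pvReplace1 s).foldl pvStep ([], 0) = w.foldl pvStep (u.reverse, 0) := by
    rw [hrep, List.foldl_append, pvNopop u [] 0 (by simpa using hufree')]
    simp
  rw [hrunA, hrunB, pvStep_shift w u.reverse 1, pvStep_shift w u.reverse 0]
  ring

-- A's while loop computes count + B's stack count, by strong induction on the length
theorem pvLoopA_eq (s : List Char) (n : Int) :
    pvLoopA n s = n + (s.foldl pvStep ([], 0)).2 := by
  induction hlen : s.length using Nat.strong_induction_on generalizing s n with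
  | _ L ih =>
    rw [pvLoopA]
    split_ifs with h
    · rw [pvCount_nf s h]
      ring
    · have hlt := pvReplace1_length_lt s h
      rw [ih (pvReplace1 s).length (by omega) (pvReplace1 s) (n + 1) rfl,
        pvCount_removeFirst s h]
      ring

-- ===== VERDICT (by name: the statement is the Claim_ definition above) =====
theorem solution_spec : Claim_equal_solution := by
  intro data _
  show solution data = solution_alt data
  unfold solution solution_alt
  rw [pvLoopA_eq]
  ring
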